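-- pv_equiv track=rewrite | github.com/adityaanilraut/University | CSCI-650/cykTests.py | nongeneratingSymbols
-- ===== SOURCE A (Python) =====
-- def nongeneratingSymbols(G):
--   V, T, P, S = G
--   invP = {}
--   for head,bodies in P.items():
--     for body in bodies:
--       invP[body] = invP.get(body, set()) | {head}
--   generating = {t for t in T}
--   work = list(T)
--   while len(work) > 0:
--     newSyms = {sym for body in invP.get(work[0], []) for sym in body} - generating
--     generating |= newSyms
--     work = work[1:] + [s for s in newSyms if s in V]
--   return V - generating
-- ===== SOURCE B (Python) =====
-- def nongeneratingSymbols(G):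
--   V, T, P, S = G
--   trig = set(T) | set(V)
--   gen = set(T)
--   changed = True
--   while changed:
--     changed = False
--     for head, bodies in P.items():
--       if any(b in gen and b in trig for b in bodies):
--         for c in head:
--           if c not in gen:
--             gen.add(c)
--             changed = True
--   return V - gen
-- ===== Notes on version B (the rewrite author's own statement) =====
-- stated objective: faster
-- what changed: Replaces A's inverse index (invP) plus worklist with a plain chaotic-iteration fixpoint: repeatedly scan all productions, adding the head's characters whenever some body is an already-generating symbol of T∪V, until a full pass adds nothing; this drops A's per-pop whole-queue copy (work = work[1:] + ...).
import Mathlib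
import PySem

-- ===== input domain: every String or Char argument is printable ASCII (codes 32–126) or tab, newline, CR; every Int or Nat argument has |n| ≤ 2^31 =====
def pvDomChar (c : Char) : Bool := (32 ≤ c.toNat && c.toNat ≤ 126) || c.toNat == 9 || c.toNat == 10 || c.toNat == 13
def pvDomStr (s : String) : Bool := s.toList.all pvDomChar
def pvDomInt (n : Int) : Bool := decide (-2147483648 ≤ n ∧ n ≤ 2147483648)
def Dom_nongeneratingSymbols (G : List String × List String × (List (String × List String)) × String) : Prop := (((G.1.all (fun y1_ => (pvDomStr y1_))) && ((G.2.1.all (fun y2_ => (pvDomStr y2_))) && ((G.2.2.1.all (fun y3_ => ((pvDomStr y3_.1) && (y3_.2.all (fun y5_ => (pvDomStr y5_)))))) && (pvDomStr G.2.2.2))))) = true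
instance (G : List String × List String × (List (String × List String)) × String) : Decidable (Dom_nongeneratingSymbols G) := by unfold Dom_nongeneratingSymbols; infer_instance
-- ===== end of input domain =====

-- B replaces A's inverse index + worklist with a plain repeated-scan fixpoint over the productions (simpler; equal return value, neither mutates its input).

-- ===== PORT A =====

-- invP[body] = invP.get(body, set()) | {head}, for every (head, bodies) in P.items(), body in bodies
def pvBuildInv (P : List (String × List String)) : PySem.Dict String (List String) :=
  P.foldl
    (fun d hb =>
      hb.2.foldl
        (fun d body => d.insert body (PySem.Set.union (d.getD body PySem.Set.empty) [hb.1]))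
        d)
    PySem.Dict.empty

-- the 'while len(work) > 0' loop (fuel is only a totality device; its sufficiency is proved below)
def pvLoopA (invP : PySem.Dict String (List String)) (V : List String) :
    Nat → PySem.Set String → List String → PySem.Set String
  | 0, generating, _ => generating
  | _ + 1, generating, [] => generating
  | fuel + 1, generating, w :: rest =>
    let newSyms :=
      PySem.Set.diff
        (PySem.Set.ofList
          ((invP.getD w []).flatMap (fun b => b.toList.map (fun c => String.ofList [c]))))
        generating
    pvLoopA invP V fuel (PySem.Set.union generating newSyms)
      (rest ++ newSyms.filter (fun s => V.contains s))

def nongeneratingSymbols (G : List String × List String × (List (String × List String)) × String) : List String :=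
  let V := G.1
  let T := G.2.1
  let P := G.2.2.1
  let invP := pvBuildInv P
  let generating := PySem.Set.ofList T
  let work := T
  let fuel := (P.flatMap (fun hb => hb.1.toList)).length + T.length + 1
  PySem.Set.diff V (pvLoopA invP V fuel generating work)

-- ===== PORT B =====

-- 'for c in head: if c not in gen: gen.add(c); changed = True'
def pvInnerStep (st : PySem.Set String × Bool) (c : Char) : PySem.Set String × Bool :=
  if PySem.Set.contains st.1 (String.ofList [c]) then st
  else (PySem.Set.add st.1 (String.ofList [c]), true)

-- one production: 'if any(b in gen and b in trig for b in bodies): …'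
def pvOuterStep (trig : PySem.Set String) (st : PySem.Set String × Bool)
    (hb : String × List String) : PySem.Set String × Bool :=
  if hb.2.any (fun b => PySem.Set.contains st.1 b && PySem.Set.contains trig b) then
    hb.1.toList.foldl pvInnerStep st
  else st

-- one full scan of P.items(): the body of the 'while changed' loop after 'changed = False'
def pvPassB (trig : PySem.Set String) (P : List (String × List String))
    (gen : PySem.Set String) : PySem.Set String × Bool :=
  P.foldl (pvOuterStep trig) (gen, false)

-- 'while changed' (fuel is only a totality device; its sufficiency is proved below)
def pvLoopB (trig : PySem.Set String) (P : List (String × List String)) :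
    Nat → PySem.Set String → PySem.Set String
  | 0, gen => gen
  | fuel + 1, gen =>
    let r := pvPassB trig P gen
    if r.2 then pvLoopB trig P fuel r.1 else r.1

def nongeneratingSymbols_alt (G : List String × List String × (List (String × List String)) × String) : List String :=
  let V := G.1
  let T := G.2.1
  let P := G.2.2.1
  let trig := PySem.Set.union (PySem.Set.ofList T) V
  let gen := PySem.Set.ofList T
  let fuel := (P.flatMap (fun hb => hb.1.toList)).length + T.length + 1
  PySem.Set.diff V (pvLoopB trig P fuel gen)

-- ===== PRECONDITION & SPEC =====
def Spec_nongeneratingSymbols (G : List String × List String × (List (String × List String)) × String) (out : List String) : Prop := out = nongeneratingSymbols_alt G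
instance (G : List String × List String × (List (String × List String)) × String) (out : List String) : Decidable (Spec_nongeneratingSymbols G out) := by unfold Spec_nongeneratingSymbols; infer_instance

-- ===== CLAIM (what is proved, stated in full; the proofs are below) =====
def Claim_equal_nongeneratingSymbols : Prop := ∀ (G : List String × List String × (List (String × List String)) × String), Dom_nongeneratingSymbols G → Spec_nongeneratingSymbols G (nongeneratingSymbols G)

-- ===== LEMMAS AND PROOFS =====

-- the closure both programs compute: least set containing T and closed under
-- "some body of (head, bodies) ∈ P is generating and lies in T ∪ V ⇒ every character of head is generating"
inductive pvGen (V T : List String) (P : List (String × List String)) : String → Prop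
  | base {s : String} : s ∈ T → pvGen V T P s
  | step {head : String} {bodies : List String} {body : String} {c : Char} :
      (head, bodies) ∈ P → body ∈ bodies → pvGen V T P body → (body ∈ T ∨ body ∈ V) →
      c ∈ head.toList → pvGen V T P (String.ofList [c])

def pvClosed (V T : List String) (P : List (String × List String)) (gen : List String) : Prop :=
  ∀ head bodies body, (head, bodies) ∈ P → body ∈ bodies → body ∈ gen → (body ∈ T ∨ body ∈ V) →
    ∀ c ∈ head.toList, String.ofList [c] ∈ gen

theorem pvGen_subset_of_closed {V T : List String} {P : List (String × List String)}
    {R : List String} (hT : ∀ s ∈ T, s ∈ R) (hC : pvClosed V T P R) :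
    ∀ s, pvGen V T P s → s ∈ R := by
  intro s h
  induction h with
  | base hs => exact hT _ hs
  | step hP hb _ hTV hc ih => exact hC _ _ _ hP hb ih hTV _ hc

theorem pvMem_buildInv_inner (bodies : List String) (head : String)
    (d : PySem.Dict String (List String)) (b h : String) :
    h ∈ (bodies.foldl
        (fun d body => d.insert body (PySem.Set.union (d.getD body PySem.Set.empty) [head]))
        d).getD b [] ↔ h ∈ d.getD b [] ∨ (b ∈ bodies ∧ h = head) := by
  induction bodies generalizing d with
  | nil => simp
  | cons x xs ih =>
    simp only [List.foldl_cons, ih, PySem.Dict.getD_insert, List.mem_cons]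
    by_cases hbx : b = x
    · rw [if_pos hbx]
      subst hbx
      simp only [PySem.Set.mem_union, PySem.Set.empty, List.mem_singleton]
      tauto
    · rw [if_neg hbx]
      tauto

theorem pvMem_buildInv_aux (P : List (String × List String))
    (d : PySem.Dict String (List String)) (b h : String) :
    h ∈ (P.foldl
        (fun d hb =>
          hb.2.foldl
            (fun d body => d.insert body (PySem.Set.union (d.getD body PySem.Set.empty) [hb.1]))
            d)
        d).getD b [] ↔
      h ∈ d.getD b [] ∨ ∃ bodies, (h, bodies) ∈ P ∧ b ∈ bodies := by
  induction P generalizing d with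
  | nil => simp
  | cons e es ih =>
    obtain ⟨eh, ebd⟩ := e
    simp only [List.foldl_cons, ih, pvMem_buildInv_inner, List.mem_cons, Prod.mk.injEq]
    constructor
    · rintro ((hd | ⟨hb, rfl⟩) | ⟨bd, hbd, hbb⟩)
      · exact Or.inl hd
      · exact Or.inr ⟨ebd, Or.inl ⟨rfl, rfl⟩, hb⟩
      · exact Or.inr ⟨bd, Or.inr hbd, hbb⟩
    · rintro (hd | ⟨bd, (⟨rfl, rfl⟩ | hbd), hbb⟩)
      · exact Or.inl (Or.inl hd)
      · exact Or.inl (Or.inr ⟨hbb, rfl⟩)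
      · exact Or.inr ⟨bd, hbd, hbb⟩

theorem pvMem_buildInv (P : List (String × List String)) (b h : String) :
    h ∈ (pvBuildInv P).getD b [] ↔ ∃ bodies, (h, bodies) ∈ P ∧ b ∈ bodies := by
  rw [pvBuildInv, pvMem_buildInv_aux]
  simp [PySem.Dict.getD_empty]

-- the universe of symbols the loops can ever add: characters of heads (as 1-char strings)
def pvChars (P : List (String × List String)) : List String :=
  (P.flatMap (fun hb => hb.1.toList)).map (fun c => String.ofList [c])

theorem pvMem_chars {P : List (String × List String)} {head : String} {bodies : List String}
    {c : Char} (hP : (head, bodies) ∈ P) (hc : c ∈ head.toList) :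
    String.ofList [c] ∈ pvChars P := by
  rw [pvChars, List.mem_map]
  exact ⟨c, List.mem_flatMap.mpr ⟨(head, bodies), hP, hc⟩, rfl⟩

-- ----- A side -----

theorem pvLoopA_grows (invP : PySem.Dict String (List String)) (V : List String) :
    ∀ (fuel : Nat) (gen : PySem.Set String) (work : List String) (s : String),
      s ∈ gen → s ∈ pvLoopA invP V fuel gen work := by
  intro fuel
  induction fuel with
  | zero => intro gen work s hs; simpa [pvLoopA] using hs
  | succ n ih =>
    intro gen work s hs
    cases work with
    | nil => simpa [pvLoopA] using hs
    | cons w rest =>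
      simp only [pvLoopA]
      exact ih _ _ _ (by rw [PySem.Set.mem_union]; exact Or.inl hs)

theorem pvLoopA_sound (V T : List String) (P : List (String × List String)) :
    ∀ (fuel : Nat) (gen : PySem.Set String) (work : List String),
      (∀ s ∈ gen, pvGen V T P s) →
      (∀ s ∈ work, s ∈ gen ∧ (s ∈ T ∨ s ∈ V)) →
      ∀ s ∈ pvLoopA (pvBuildInv P) V fuel gen work, pvGen V T P s := by
  intro fuel
  induction fuel with
  | zero => intro gen work hg _ s hs; exact hg s (by simpa [pvLoopA] using hs)
  | succ n ih =>
    intro gen work hg hw s hs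
    cases work with
    | nil => exact hg s (by simpa [pvLoopA] using hs)
    | cons w rest =>
      simp only [pvLoopA] at hs
      have hnew : ∀ x ∈ PySem.Set.diff
          (PySem.Set.ofList
            (((pvBuildInv P).getD w []).flatMap (fun b => b.toList.map (fun c => String.ofList [c]))))
          gen, pvGen V T P x := by
        intro x hx
        rw [PySem.Set.mem_diff, PySem.Set.mem_ofList] at hx
        obtain ⟨hx1, _⟩ := hx
        rw [List.mem_flatMap] at hx1
        obtain ⟨hd, hhd, hx1⟩ := hx1
        rw [List.mem_map] at hx1
        obtain ⟨c, hc, rfl⟩ := hx1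
        rw [pvMem_buildInv] at hhd
        obtain ⟨bodies, hP, hb⟩ := hhd
        obtain ⟨hwg, hwTV⟩ := hw w (by simp)
        exact pvGen.step hP hb (hg w hwg) hwTV hc
      refine ih _ _ ?_ ?_ s hs
      · intro x hx
        rw [PySem.Set.mem_union] at hx
        rcases hx with hx | hx
        · exact hg x hx
        · exact hnew x hx
      · intro x hx
        rcases List.mem_append.mp hx with hx | hx
        · obtain ⟨h1, h2⟩ := hw x (by simp [hx])
          exact ⟨by rw [PySem.Set.mem_union]; exact Or.inl h1, h2⟩
        · rw [List.mem_filter] at hx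
          obtain ⟨hx1, hx2⟩ := hx
          refine ⟨by rw [PySem.Set.mem_union]; exact Or.inr hx1, Or.inr ?_⟩
          simpa using hx2

-- deficit: universe symbols not yet generating
def pvDefA (P : List (String × List String)) (gen : List String) : Nat :=
  ((PySem.List.dedup (pvChars P)).filter (fun s => !(decide (s ∈ gen)))).length

theorem pvFilter_length_split {α : Type} {p : α → Bool} (L : List α) :
    (L.filter p).length + (L.filter (fun x => !(p x))).length = L.length := by
  induction L with
  | nil => rfl
  | cons x xs ih =>
    by_cases hx : p x <;> simp [hx] <;> omega

theorem pvDefA_drop (P : List (String × List String)) (gen newSyms : List String)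
    (hnd : newSyms.Nodup)
    (hsub : ∀ s ∈ newSyms, s ∈ pvChars P ∧ s ∉ gen) :
    pvDefA P gen = pvDefA P (PySem.Set.union gen newSyms) + newSyms.length := by
  classical
  unfold pvDefA
  set D := PySem.List.dedup (pvChars P) with hD
  set L := D.filter (fun s => !(decide (s ∈ gen))) with hL
  have hLnd : L.Nodup := (PySem.List.nodup_dedup _).filter _
  have hstep1 : D.filter (fun s => !(decide (s ∈ PySem.Set.union gen newSyms))) =
      L.filter (fun s => !(decide (s ∈ newSyms))) := by
    rw [hL, List.filter_filter]
    apply List.filter_congr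
    intro s _
    by_cases h1 : s ∈ gen <;> by_cases h2 : s ∈ newSyms <;>
      simp [PySem.Set.mem_union, h1, h2]
  have hstep2 : (L.filter (fun s => decide (s ∈ newSyms))).length +
      (L.filter (fun s => !(decide (s ∈ newSyms)))).length = L.length :=
    pvFilter_length_split L
  have hstep3 : (L.filter (fun s => decide (s ∈ newSyms))).length = newSyms.length := by
    apply List.Perm.length_eq
    rw [List.perm_ext_iff_of_nodup (hLnd.filter _) hnd]
    intro a
    rw [List.mem_filter, hL, List.mem_filter]
    constructor
    · rintro ⟨⟨_, _⟩, ha⟩; exact of_decide_eq_true ha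
    · intro ha
      obtain ⟨h1, h2⟩ := hsub a ha
      refine ⟨⟨?_, by simpa using h2⟩, by simpa using ha⟩
      rw [hD, PySem.List.mem_dedup]; exact h1
  rw [hstep1]
  omega

theorem pvLoopA_closed (V T : List String) (P : List (String × List String)) :
    ∀ (fuel : Nat) (gen : PySem.Set String) (work : List String),
      pvDefA P gen + work.length < fuel →
      (∀ s ∈ T, s ∈ gen) →
      (∀ b, b ∈ gen → (b ∈ T ∨ b ∈ V) → b ∉ work →
        ∀ head bodies, (head, bodies) ∈ P → b ∈ bodies →
          ∀ c ∈ head.toList, String.ofList [c] ∈ gen) →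
      pvClosed V T P (pvLoopA (pvBuildInv P) V fuel gen work) := by
  intro fuel
  induction fuel with
  | zero => intro gen work hlt; exact absurd hlt (Nat.not_lt_zero _)
  | succ n ih =>
    intro gen work hlt hT hproc
    cases work with
    | nil =>
      simp only [pvLoopA]
      intro head bodies body hP hb hbg hTV c hc
      exact hproc body hbg hTV (by simp) head bodies hP hb c hc
    | cons w rest =>
      simp only [pvLoopA]
      set X := ((pvBuildInv P).getD w []).flatMap (fun b => b.toList.map (fun c => String.ofList [c])) with hX
      set newSyms := PySem.Set.diff (PySem.Set.ofList X) gen with hNS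
      have hNSnd : newSyms.Nodup := PySem.Set.nodup_diff _ _ (PySem.Set.nodup_ofList _)
      have hNSsub : ∀ s ∈ newSyms, s ∈ pvChars P ∧ s ∉ gen := by
        intro s hs
        rw [hNS, PySem.Set.mem_diff, PySem.Set.mem_ofList] at hs
        obtain ⟨hs1, hs2⟩ := hs
        refine ⟨?_, hs2⟩
        rw [hX, List.mem_flatMap] at hs1
        obtain ⟨hd, hhd, hs1⟩ := hs1
        rw [List.mem_map] at hs1
        obtain ⟨c, hc, rfl⟩ := hs1
        rw [pvMem_buildInv] at hhd
        obtain ⟨bodies, hP, hb⟩ := hhd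
        exact pvMem_chars hP hc
      have hdrop := pvDefA_drop P gen newSyms hNSnd hNSsub
      apply ih
      · have hfl : (newSyms.filter (fun s => V.contains s)).length ≤ newSyms.length :=
          List.length_filter_le _ _
        rw [List.length_append]
        simp only [List.length_cons] at hlt
        omega
      · intro s hs
        rw [PySem.Set.mem_union]
        exact Or.inl (hT s hs)
      · intro b hbg hTV hbw
        rw [PySem.Set.mem_union] at hbg
        rcases hbg with hbg | hbnew
        · by_cases hbw' : b = w
          · subst hbw'
            intro head bodies hP hbbod c hc
            have hcX : String.ofList [c] ∈ X := by
              rw [hX, List.mem_flatMap]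
              refine ⟨head, ?_, List.mem_map.mpr ⟨c, hc, rfl⟩⟩
              rw [pvMem_buildInv]
              exact ⟨bodies, hP, hbbod⟩
            rw [PySem.Set.mem_union]
            by_cases hcg : String.ofList [c] ∈ gen
            · exact Or.inl hcg
            · exact Or.inr (by rw [hNS, PySem.Set.mem_diff, PySem.Set.mem_ofList]; exact ⟨hcX, hcg⟩)
          · have hbrest : b ∉ rest := fun h => hbw (List.mem_append.mpr (Or.inl h))
            intro head bodies hP hbbod c hc
            rw [PySem.Set.mem_union]
            exact Or.inl (hproc b hbg hTV (by simp [hbw', hbrest]) head bodies hP hbbod c hc)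
        · exfalso
          obtain ⟨_, hbngen⟩ := hNSsub b hbnew
          rcases hTV with hbT | hbV
          · exact hbngen (hT b hbT)
          · exact hbw (List.mem_append.mpr (Or.inr (List.mem_filter.mpr ⟨hbnew, by simpa using hbV⟩)))

theorem pvA_mem_iff (V T : List String) (P : List (String × List String)) (s : String) :
    s ∈ pvLoopA (pvBuildInv P) V ((P.flatMap (fun hb => hb.1.toList)).length + T.length + 1)
        (PySem.Set.ofList T) T ↔ pvGen V T P s := by
  constructor
  · apply pvLoopA_sound
    · intro x hx
      exact pvGen.base ((PySem.Set.mem_ofList _ _).mp hx)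
    · intro x hx
      exact ⟨(PySem.Set.mem_ofList _ _).mpr hx, Or.inl hx⟩
  · intro hs
    have hclosed : pvClosed V T P (pvLoopA (pvBuildInv P) V
        ((P.flatMap (fun hb => hb.1.toList)).length + T.length + 1) (PySem.Set.ofList T) T) := by
      apply pvLoopA_closed
      · have h1 : pvDefA P (PySem.Set.ofList T) ≤ (P.flatMap (fun hb => hb.1.toList)).length := by
          calc pvDefA P (PySem.Set.ofList T) ≤ (PySem.List.dedup (pvChars P)).length :=
                List.length_filter_le _ _
            _ ≤ (pvChars P).length := by
                rw [PySem.List.dedup_eq_ofList]; exact PySem.Set.length_ofList_le _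
            _ = (P.flatMap (fun hb => hb.1.toList)).length := by rw [pvChars, List.length_map]
        omega
      · intro x hx; exact (PySem.Set.mem_ofList _ _).mpr hx
      · intro b hbg _ hbw
        exact absurd ((PySem.Set.mem_ofList _ _).mp hbg) hbw
    exact pvGen_subset_of_closed
      (fun x hx => pvLoopA_grows _ _ _ _ _ _ ((PySem.Set.mem_ofList _ _).mpr hx)) hclosed s hs

-- ----- B side -----

theorem pvTrig_mem (T V : List String) (b : String) :
    b ∈ PySem.Set.union (PySem.Set.ofList T) V ↔ b ∈ T ∨ b ∈ V := by
  rw [PySem.Set.mem_union, PySem.Set.mem_ofList]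

theorem pvInner_mono (cs : List Char) :
    ∀ (st : PySem.Set String × Bool) (s : String), s ∈ st.1 → s ∈ (cs.foldl pvInnerStep st).1 := by
  induction cs with
  | nil => intro st s hs; exact hs
  | cons c cs ih =>
    intro st s hs
    rw [List.foldl_cons]
    apply ih
    unfold pvInnerStep
    split
    · exact hs
    · exact (PySem.Set.mem_add _ _ _).mpr (Or.inl hs)

theorem pvOuter_mono (trig : PySem.Set String) (l : List (String × List String)) :
    ∀ (st : PySem.Set String × Bool) (s : String), s ∈ st.1 → s ∈ (l.foldl (pvOuterStep trig) st).1 := by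
  induction l with
  | nil => intro st s hs; exact hs
  | cons hb l ih =>
    intro st s hs
    rw [List.foldl_cons]
    apply ih
    unfold pvOuterStep
    split
    · exact pvInner_mono _ _ _ hs
    · exact hs

theorem pvInner_len (cs : List Char) :
    ∀ (st : PySem.Set String × Bool), st.1.length ≤ (cs.foldl pvInnerStep st).1.length := by
  induction cs with
  | nil => intro st; exact Nat.le_refl _
  | cons c cs ih =>
    intro st
    rw [List.foldl_cons]
    refine Nat.le_trans ?_ (ih _)
    unfold pvInnerStep
    split
    · exact Nat.le_refl _
    · rename_i hc
      rw [PySem.Set.add_of_not_mem (by simpa [PySem.Set.contains_iff] using hc)]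
      simp

theorem pvOuter_len (trig : PySem.Set String) (l : List (String × List String)) :
    ∀ (st : PySem.Set String × Bool), st.1.length ≤ (l.foldl (pvOuterStep trig) st).1.length := by
  induction l with
  | nil => intro st; exact Nat.le_refl _
  | cons hb l ih =>
    intro st
    rw [List.foldl_cons]
    refine Nat.le_trans ?_ (ih _)
    unfold pvOuterStep
    split
    · exact pvInner_len _ _
    · exact Nat.le_refl _

theorem pvInner_flag (cs : List Char) :
    ∀ (st : PySem.Set String × Bool), st.2 = true → (cs.foldl pvInnerStep st).2 = true := by
  induction cs with
  | nil => intro st h; exact h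
  | cons c cs ih =>
    intro st h
    rw [List.foldl_cons]
    apply ih
    unfold pvInnerStep
    split
    · exact h
    · rfl

theorem pvOuter_flag (trig : PySem.Set String) (l : List (String × List String)) :
    ∀ (st : PySem.Set String × Bool), st.2 = true → (l.foldl (pvOuterStep trig) st).2 = true := by
  induction l with
  | nil => intro st h; exact h
  | cons hb l ih =>
    intro st h
    rw [List.foldl_cons]
    apply ih
    unfold pvOuterStep
    split
    · exact pvInner_flag _ _ h
    · exact h

theorem pvInner_false (cs : List Char) :
    ∀ (st : PySem.Set String × Bool), (cs.foldl pvInnerStep st).2 = false →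
      cs.foldl pvInnerStep st = st ∧ ∀ c ∈ cs, String.ofList [c] ∈ st.1 := by
  induction cs with
  | nil => intro st _; exact ⟨rfl, by simp⟩
  | cons c cs ih =>
    intro st hf
    rw [List.foldl_cons] at hf ⊢
    by_cases hc : PySem.Set.contains st.1 (String.ofList [c]) = true
    · have hstep : pvInnerStep st c = st := by unfold pvInnerStep; rw [if_pos hc]
      rw [hstep] at hf ⊢
      obtain ⟨h1, h2⟩ := ih st hf
      refine ⟨h1, ?_⟩
      intro x hx
      rcases List.mem_cons.mp hx with rfl | hx
      · exact (PySem.Set.contains_iff _ _).mp hc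
      · exact h2 x hx
    · exfalso
      have hstep : pvInnerStep st c = (PySem.Set.add st.1 (String.ofList [c]), true) := by
        unfold pvInnerStep; rw [if_neg hc]
      rw [hstep] at hf
      have := pvInner_flag cs (PySem.Set.add st.1 (String.ofList [c]), true) rfl
      rw [this] at hf
      simp at hf

theorem pvOuter_false (trig : PySem.Set String) (l : List (String × List String)) :
    ∀ (st : PySem.Set String × Bool), (l.foldl (pvOuterStep trig) st).2 = false →
      l.foldl (pvOuterStep trig) st = st ∧
      ∀ hb ∈ l, hb.2.any (fun b => PySem.Set.contains st.1 b && PySem.Set.contains trig b) = true →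
        ∀ c ∈ hb.1.toList, String.ofList [c] ∈ st.1 := by
  induction l with
  | nil => intro st _; exact ⟨rfl, by simp⟩
  | cons hb l ih =>
    intro st hf
    rw [List.foldl_cons] at hf ⊢
    by_cases hany : hb.2.any (fun b => PySem.Set.contains st.1 b && PySem.Set.contains trig b) = true
    · have hstep : pvOuterStep trig st hb = hb.1.toList.foldl pvInnerStep st := by
        unfold pvOuterStep; rw [if_pos hany]
      rw [hstep] at hf ⊢
      have hinnerflag : (hb.1.toList.foldl pvInnerStep st).2 = false := by
        by_contra h
        have : (hb.1.toList.foldl pvInnerStep st).2 = true := by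
          cases hb' : (hb.1.toList.foldl pvInnerStep st).2
          · exact absurd hb' h
          · rfl
        have := pvOuter_flag trig l _ this
        rw [this] at hf
        simp at hf
      obtain ⟨hieq, hichars⟩ := pvInner_false _ _ hinnerflag
      rw [hieq] at hf ⊢
      obtain ⟨h1, h2⟩ := ih st hf
      refine ⟨h1, ?_⟩
      intro e he hetrig c hc
      rcases List.mem_cons.mp he with rfl | he
      · exact hichars c hc
      · exact h2 e he hetrig c hc
    · have hstep : pvOuterStep trig st hb = st := by
        unfold pvOuterStep; rw [if_neg hany]
      rw [hstep] at hf ⊢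
      obtain ⟨h1, h2⟩ := ih st hf
      refine ⟨h1, ?_⟩
      intro e he hetrig c hc
      rcases List.mem_cons.mp he with rfl | he
      · exact absurd hetrig hany
      · exact h2 e he hetrig c hc

theorem pvInner_true_len (cs : List Char) :
    ∀ (st : PySem.Set String × Bool), st.2 = false → (cs.foldl pvInnerStep st).2 = true →
      st.1.length < (cs.foldl pvInnerStep st).1.length := by
  induction cs with
  | nil => intro st h1 h2; rw [List.foldl_nil] at h2; rw [h1] at h2; simp at h2
  | cons c cs ih =>
    intro st h1 h2
    rw [List.foldl_cons] at h2 ⊢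
    by_cases hc : PySem.Set.contains st.1 (String.ofList [c]) = true
    · have hstep : pvInnerStep st c = st := by unfold pvInnerStep; rw [if_pos hc]
      rw [hstep] at h2 ⊢
      exact ih st h1 h2
    · have hstep : pvInnerStep st c = (PySem.Set.add st.1 (String.ofList [c]), true) := by
        unfold pvInnerStep; rw [if_neg hc]
      rw [hstep] at h2 ⊢
      have hlen : st.1.length < (PySem.Set.add st.1 (String.ofList [c])).length := by
        rw [PySem.Set.add_of_not_mem (by simpa [PySem.Set.contains_iff] using hc)]
        simp
      exact Nat.lt_of_lt_of_le hlen (pvInner_len cs (PySem.Set.add st.1 (String.ofList [c]), true))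

theorem pvOuter_true_len (trig : PySem.Set String) (l : List (String × List String)) :
    ∀ (st : PySem.Set String × Bool), st.2 = false → (l.foldl (pvOuterStep trig) st).2 = true →
      st.1.length < (l.foldl (pvOuterStep trig) st).1.length := by
  induction l with
  | nil => intro st h1 h2; rw [List.foldl_nil] at h2; rw [h1] at h2; simp at h2
  | cons hb l ih =>
    intro st h1 h2
    rw [List.foldl_cons] at h2 ⊢
    cases hst' : (pvOuterStep trig st hb).2
    · have hlen : st.1.length ≤ (pvOuterStep trig st hb).1.length := by
        unfold pvOuterStep
        split
        · exact pvInner_len _ _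
        · exact Nat.le_refl _
      exact Nat.lt_of_le_of_lt hlen (ih _ hst' h2)
    · have hlt : st.1.length < (pvOuterStep trig st hb).1.length := by
        unfold pvOuterStep at hst' ⊢
        split at hst'
        · rw [if_pos (by assumption)]
          exact pvInner_true_len _ _ h1 hst'
        · rw [h1] at hst'; exact absurd hst' Bool.false_ne_true
      exact Nat.lt_of_lt_of_le hlt (pvOuter_len trig l _)

-- preservation of an arbitrary predicate through one pass
theorem pvInner_pres (Q : String → Prop) (cs : List Char) :
    ∀ (st : PySem.Set String × Bool), (∀ s ∈ st.1, Q s) → (∀ c ∈ cs, Q (String.ofList [c])) →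
      ∀ s ∈ (cs.foldl pvInnerStep st).1, Q s := by
  induction cs with
  | nil => intro st h1 _ s hs; exact h1 s hs
  | cons c cs ih =>
    intro st h1 h2 s hs
    rw [List.foldl_cons] at hs
    refine ih _ ?_ (fun x hx => h2 x (List.mem_cons.mpr (Or.inr hx))) s hs
    intro x hx
    unfold pvInnerStep at hx
    split at hx
    · exact h1 x hx
    · rcases (PySem.Set.mem_add _ _ _).mp hx with hx | rfl
      · exact h1 x hx
      · exact h2 c (by simp)

theorem pvOuter_pres (trig : PySem.Set String) (Q : String → Prop) (l : List (String × List String)) :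
    ∀ (st : PySem.Set String × Bool), (∀ s ∈ st.1, Q s) →
      (∀ hb ∈ l, ∀ g : List String, (∀ s ∈ g, Q s) →
        hb.2.any (fun b => PySem.Set.contains g b && PySem.Set.contains trig b) = true →
        ∀ c ∈ hb.1.toList, Q (String.ofList [c])) →
      ∀ s ∈ (l.foldl (pvOuterStep trig) st).1, Q s := by
  induction l with
  | nil => intro st h1 _ s hs; exact h1 s hs
  | cons hb l ih =>
    intro st h1 h2 s hs
    rw [List.foldl_cons] at hs
    refine ih _ ?_ (fun e he => h2 e (List.mem_cons.mpr (Or.inr he))) s hs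
    intro x hx
    unfold pvOuterStep at hx
    split at hx
    · rename_i hany
      exact pvInner_pres Q _ st h1 (h2 hb (by simp) st.1 h1 hany) x hx
    · exact h1 x hx

theorem pvInner_nodup (cs : List Char) :
    ∀ (st : PySem.Set String × Bool), st.1.Nodup → (cs.foldl pvInnerStep st).1.Nodup := by
  induction cs with
  | nil => intro st h; exact h
  | cons c cs ih =>
    intro st h
    rw [List.foldl_cons]
    apply ih
    unfold pvInnerStep
    split
    · exact h
    · exact PySem.Set.nodup_add _ _ h

theorem pvOuter_nodup (trig : PySem.Set String) (l : List (String × List String)) :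
    ∀ (st : PySem.Set String × Bool), st.1.Nodup → (l.foldl (pvOuterStep trig) st).1.Nodup := by
  induction l with
  | nil => intro st h; exact h
  | cons hb l ih =>
    intro st h
    rw [List.foldl_cons]
    apply ih
    unfold pvOuterStep
    split
    · exact pvInner_nodup _ _ h
    · exact h

theorem pvLoopB_grows (trig : PySem.Set String) (P : List (String × List String)) :
    ∀ (fuel : Nat) (gen : PySem.Set String) (s : String), s ∈ gen → s ∈ pvLoopB trig P fuel gen := by
  intro fuel
  induction fuel with
  | zero => intro gen s hs; exact hs
  | succ n ih =>
    intro gen s hs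
    simp only [pvLoopB]
    split
    · exact ih _ _ (pvOuter_mono trig P _ s hs)
    · exact pvOuter_mono trig P _ s hs

theorem pvLoopB_sound (V T : List String) (P : List (String × List String)) :
    ∀ (fuel : Nat) (gen : PySem.Set String), (∀ s ∈ gen, pvGen V T P s) →
      ∀ s ∈ pvLoopB (PySem.Set.union (PySem.Set.ofList T) V) P fuel gen, pvGen V T P s := by
  intro fuel
  induction fuel with
  | zero => intro gen hg s hs; exact hg s hs
  | succ n ih =>
    intro gen hg s hs
    have hpass : ∀ x ∈ (pvPassB (PySem.Set.union (PySem.Set.ofList T) V) P gen).1, pvGen V T P x := by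
      apply pvOuter_pres _ _ P (gen, false) hg
      intro hb hhb g hgQ hany c hc
      rw [List.any_eq_true] at hany
      obtain ⟨b, hbmem, hcond⟩ := hany
      rw [Bool.and_eq_true, PySem.Set.contains_iff, PySem.Set.contains_iff] at hcond
      obtain ⟨hbg, hbtrig⟩ := hcond
      rw [pvTrig_mem] at hbtrig
      obtain ⟨h1, h2⟩ := hb
      exact pvGen.step (show (h1, h2) ∈ P from hhb) hbmem (hgQ b hbg) hbtrig hc
    simp only [pvLoopB] at hs
    split at hs
    · exact ih _ hpass s hs
    · exact hpass s hs

theorem pvLoopB_closed (V T : List String) (P : List (String × List String)) :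
    ∀ (fuel : Nat) (gen : PySem.Set String), gen.Nodup →
      (∀ s ∈ gen, s ∈ T ++ pvChars P) →
      (PySem.List.dedup (T ++ pvChars P)).length < fuel + gen.length →
      pvClosed V T P (pvLoopB (PySem.Set.union (PySem.Set.ofList T) V) P fuel gen) := by
  intro fuel
  induction fuel with
  | zero =>
    intro gen hnd hsub hlt
    exfalso
    have hsubd : gen ⊆ PySem.List.dedup (T ++ pvChars P) := by
      intro x hx
      rw [PySem.List.mem_dedup]
      exact hsub x hx
    have := (hnd.subperm hsubd).length_le
    omega
  | succ n ih =>
    intro gen hnd hsub hlt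
    simp only [pvLoopB]
    set r := pvPassB (PySem.Set.union (PySem.Set.ofList T) V) P gen with hr
    cases hflag : r.2
    · rw [if_neg (by simp)]
      obtain ⟨heq, hclos⟩ := pvOuter_false _ P (gen, false) (by rw [← pvPassB, ← hr]; exact hflag)
      have hr1 : r.1 = gen := by rw [hr, pvPassB, heq]
      rw [hr1]
      intro head bodies body hP hbbod hbgen hTV c hc
      have hany : bodies.any (fun b => PySem.Set.contains gen b &&
          PySem.Set.contains (PySem.Set.union (PySem.Set.ofList T) V) b) = true := by
        rw [List.any_eq_true]
        refine ⟨body, hbbod, ?_⟩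
        rw [Bool.and_eq_true, PySem.Set.contains_iff, PySem.Set.contains_iff, pvTrig_mem]
        exact ⟨hbgen, hTV⟩
      exact hclos (head, bodies) hP hany c hc
    · rw [if_pos rfl]
      have hlen : gen.length < r.1.length := by
        rw [hr, pvPassB]
        exact pvOuter_true_len _ P (gen, false) rfl (by rw [← pvPassB, ← hr]; exact hflag)
      apply ih
      · rw [hr, pvPassB]
        exact pvOuter_nodup _ P (gen, false) hnd
      · rw [hr, pvPassB]
        apply pvOuter_pres _ (fun s => s ∈ T ++ pvChars P) P (gen, false) hsub
        intro hb hhb g _ _ c hc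
        apply List.mem_append.mpr
        exact Or.inr (pvMem_chars (head := hb.1) (bodies := hb.2) (by simpa using hhb) hc)
      · omega

theorem pvB_mem_iff (V T : List String) (P : List (String × List String)) (s : String) :
    s ∈ pvLoopB (PySem.Set.union (PySem.Set.ofList T) V) P
        ((P.flatMap (fun hb => hb.1.toList)).length + T.length + 1) (PySem.Set.ofList T) ↔
      pvGen V T P s := by
  constructor
  · apply pvLoopB_sound
    intro x hx
    exact pvGen.base ((PySem.Set.mem_ofList _ _).mp hx)
  · intro hs
    have hclosed : pvClosed V T P (pvLoopB (PySem.Set.union (PySem.Set.ofList T) V) P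
        ((P.flatMap (fun hb => hb.1.toList)).length + T.length + 1) (PySem.Set.ofList T)) := by
      apply pvLoopB_closed
      · exact PySem.Set.nodup_ofList _
      · intro x hx
        exact List.mem_append.mpr (Or.inl ((PySem.Set.mem_ofList _ _).mp hx))
      · have h1 : (PySem.List.dedup (T ++ pvChars P)).length ≤ T.length + (P.flatMap (fun hb => hb.1.toList)).length := by
          calc (PySem.List.dedup (T ++ pvChars P)).length ≤ (T ++ pvChars P).length := by
                rw [PySem.List.dedup_eq_ofList]; exact PySem.Set.length_ofList_le _
            _ = T.length + (P.flatMap (fun hb => hb.1.toList)).length := by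
                rw [List.length_append, pvChars, List.length_map]
        omega
    exact pvGen_subset_of_closed
      (fun x hx => pvLoopB_grows _ _ _ _ _ ((PySem.Set.mem_ofList _ _).mpr hx)) hclosed s hs

-- ----- assembly -----

theorem pvDiff_congr (V : List String) (R1 R2 : PySem.Set String)
    (h : ∀ s, s ∈ R1 ↔ s ∈ R2) : PySem.Set.diff V R1 = PySem.Set.diff V R2 := by
  show V.filter (fun x => !(PySem.Set.contains R1 x)) = V.filter (fun x => !(PySem.Set.contains R2 x))
  apply List.filter_congr
  intro x _
  have hc : PySem.Set.contains R1 x = PySem.Set.contains R2 x := by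
    rw [Bool.eq_iff_iff, PySem.Set.contains_iff, PySem.Set.contains_iff]
    exact h x
  rw [hc]

-- ===== VERDICT (by name: the statement is the Claim_ definition above) =====
theorem nongeneratingSymbols_spec : Claim_equal_nongeneratingSymbols := by
  intro G _
  obtain ⟨V, T, P, S⟩ := G
  unfold Spec_nongeneratingSymbols nongeneratingSymbols nongeneratingSymbols_alt
  exact pvDiff_congr V _ _ (fun s => (pvA_mem_iff V T P s).trans (pvB_mem_iff V T P s).symm)
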